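-- pv_equiv track=rewrite | github.com/qingpowuwu/PINNsAgent_Codes | pinnacle/scripts/2025_05_15/1_RandomSearch_Datasets_high_quality/3_1_get_statistics_for-1-batch.py | sort_pdes
-- ===== SOURCE A (Python) =====
-- def get_pde_order():
--     """Define the display order of PDEs"""
--     return [
--         # 1D PDEs
--         'burgers1d',
--         'wave1d',
--         # 2D PDEs
--         'burgers2d',
--         'wave2d_heterogeneous',
--         'heat2d_complexgeometry',
--         'ns2d_backstep',
--         'grayscottequation',
--         'heat2d_multiscale',
--         'heat2d_varyingcoef',
--         'poisson2d_manyarea',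
--         # 3D PDEs
--         'poisson3d_complexgeometry',
--         # ND PDEs
--         'poissonnd',
--         'heatnd',
--         # Extra PDEs to ignore
--         'ns2d_liddriven',
--         'poisson2d_classic',
--         'poissonboltzmann2d',
--     ]
--
-- def sort_pdes(pde_names):
--     """Sort PDE names according to predefined order"""
--     order = get_pde_order()
--
--     # Split into two groups: those in order and those not in order
--     ordered_pdes = []
--     other_pdes = []
--
--     for pde in pde_names:
--         if pde in order:
--             ordered_pdes.append(pde)
--         else:
--             other_pdes.append(pde)
--
--     # Sort ordered_pdes according to the order list
--     ordered_pdes.sort(key=lambda x: order.index(x))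
--
--     # Sort others alphabetically
--     other_pdes.sort()
--
--     # Merge the two groups
--     return ordered_pdes + other_pdes
-- ===== SOURCE B (Python) =====
-- def get_pde_order():
--     """Define the display order of PDEs"""
--     return [
--         'burgers1d',
--         'wave1d',
--         'burgers2d',
--         'wave2d_heterogeneous',
--         'heat2d_complexgeometry',
--         'ns2d_backstep',
--         'grayscottequation',
--         'heat2d_multiscale',
--         'heat2d_varyingcoef',
--         'poisson2d_manyarea',
--         'poisson3d_complexgeometry',
--         'poissonnd',
--         'heatnd',
--         'ns2d_liddriven',
--         'poisson2d_classic',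
--         'poissonboltzmann2d',
--     ]
--
-- def sort_pdes(pde_names):
--     """Sort PDE names according to predefined order"""
--     order = get_pde_order()
--     rank = {name: i for i, name in enumerate(order)}
--     n = len(order)
--     return sorted(pde_names, key=lambda p: (rank.get(p, n), p))
-- ===== Notes on version B (the rewrite author's own statement) =====
-- stated objective: simpler
-- what changed: One stable keyed sort over the whole list with key (rank.get(p, len(order)), p) built from an enumerate dict, instead of partitioning into two lists, sorting each with a different key (repeated list.index scans) and concatenating.
import Mathlib
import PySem

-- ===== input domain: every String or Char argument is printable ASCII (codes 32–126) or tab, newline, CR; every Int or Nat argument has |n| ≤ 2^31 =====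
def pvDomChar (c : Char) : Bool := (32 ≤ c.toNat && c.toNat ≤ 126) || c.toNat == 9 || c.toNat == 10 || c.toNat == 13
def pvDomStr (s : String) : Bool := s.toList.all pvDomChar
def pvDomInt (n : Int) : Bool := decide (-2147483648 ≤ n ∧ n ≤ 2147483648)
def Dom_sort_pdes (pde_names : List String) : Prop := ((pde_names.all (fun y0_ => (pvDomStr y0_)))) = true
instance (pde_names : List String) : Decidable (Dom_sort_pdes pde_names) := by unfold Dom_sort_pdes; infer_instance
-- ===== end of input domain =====

-- B replaces A's partition-into-two-lists + two sorts (with repeated `order.index` scans) + concatenation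
-- by one stable sort of the whole list under the key (rank.get(p, len(order)), p) built from an enumerate dict. Objective: simpler.

def get_pde_order : List String :=
  [ "burgers1d", "wave1d",
    "burgers2d", "wave2d_heterogeneous", "heat2d_complexgeometry", "ns2d_backstep",
    "grayscottequation", "heat2d_multiscale", "heat2d_varyingcoef", "poisson2d_manyarea",
    "poisson3d_complexgeometry",
    "poissonnd", "heatnd",
    "ns2d_liddriven", "poisson2d_classic", "poissonboltzmann2d" ]

-- ===== PORT A =====
def sort_pdes (pde_names : List String) : List String :=
  let order := get_pde_order
  let groups := pde_names.foldl
    (fun (acc : List String × List String) pde =>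
      if order.contains pde then (acc.1 ++ [pde], acc.2) else (acc.1, acc.2 ++ [pde]))
    ([], [])
  -- order.index(x): index? is never none here, every element of groups.1 is in order, so getD 0 never fires
  let ordered_pdes := PySem.List.sorted groups.1 (fun x => (PySem.List.index? order x).getD 0)
  let other_pdes := PySem.List.sorted groups.2 (fun x => x)
  ordered_pdes ++ other_pdes

-- ===== PORT B =====
def sort_pdes_alt (pde_names : List String) : List String :=
  let order := get_pde_order
  let rank : PySem.Dict String Int :=
    (PySem.List.enumerate order).foldl (fun d p => d.insert p.2 p.1) PySem.Dict.empty
  let n : Int := PySem.List.len order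
  PySem.List.sorted2 pde_names (fun p => rank.getD p n) (fun p => p)

-- ===== PRECONDITION & SPEC =====
def Spec_sort_pdes (pde_names : List String) (out : List String) : Prop := out = sort_pdes_alt pde_names
instance (pde_names : List String) (out : List String) : Decidable (Spec_sort_pdes pde_names out) := by unfold Spec_sort_pdes; infer_instance

-- ===== CLAIM (what is proved, stated in full; the proofs are below) =====
def Claim_equal_sort_pdes : Prop := ∀ (pde_names : List String), Dom_sort_pdes pde_names → Spec_sort_pdes pde_names (sort_pdes pde_names)

-- ===== LEMMAS AND PROOFS =====

-- abbreviations for the proof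
def pvLow (x : String) : Bool := get_pde_order.contains x
def pvKeyA (x : String) : Nat := (PySem.List.index? get_pde_order x).getD 0
def pvRank : PySem.Dict String Int :=
  (PySem.List.enumerate get_pde_order).foldl (fun d p => d.insert p.2 p.1) PySem.Dict.empty
def pvK1 (x : String) : Int := pvRank.getD x (PySem.List.len get_pde_order)
def pvB2 (a b : String) : Bool :=
  decide (pvK1 a < pvK1 b) || (!decide (pvK1 b < pvK1 a) && decide (a < b))
def pvBA (a b : String) : Bool := decide (pvKeyA a < pvKeyA b)
def pvBS (a b : String) : Bool := decide (a < b)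
def pvF (b : String → String → Bool) (xs acc : List String) : List String :=
  xs.foldl (fun acc x => PySem.List.insertBy b x acc) acc

theorem pvK1_low {x : String} (h : pvLow x = true) :
    pvK1 x = (pvKeyA x : Int) ∧ pvKeyA x < 16 := by
  have hall : ∀ y ∈ get_pde_order, pvK1 y = (pvKeyA y : Int) ∧ pvKeyA y < 16 := by decide
  exact hall x (by simpa [pvLow] using h)

theorem pvK1_high {x : String} (h : pvLow x = false) : pvK1 x = 16 := by
  have hm : x ∉ get_pde_order := by simpa [pvLow] using h
  have hk : pvRank.keys = get_pde_order := by decide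
  have hc : pvRank.contains x = false := by
    rw [PySem.Dict.contains_eq_decide_mem_keys, hk]
    simpa using hm
  rw [pvK1, PySem.Dict.getD_of_not_contains _ _ hc]
  decide

theorem pvKeyA_inj {a b : String} (ha : pvLow a = true) (hb : pvLow b = true)
    (h : pvKeyA a = pvKeyA b) : a = b := by
  have hma : a ∈ get_pde_order := by simpa [pvLow] using ha
  have hmb : b ∈ get_pde_order := by simpa [pvLow] using hb
  obtain ⟨ka, hka⟩ := Option.isSome_iff_exists.mp
    ((PySem.List.index?_isSome_iff get_pde_order a).mpr hma)
  obtain ⟨kb, hkb⟩ := Option.isSome_iff_exists.mp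
    ((PySem.List.index?_isSome_iff get_pde_order b).mpr hmb)
  have hva : pvKeyA a = ka := by unfold pvKeyA; rw [hka]; rfl
  have hvb : pvKeyA b = kb := by unfold pvKeyA; rw [hkb]; rfl
  obtain ⟨hlta, hga, -⟩ := PySem.List.getElem_of_index?_eq_some hka
  obtain ⟨hltb, hgb, -⟩ := PySem.List.getElem_of_index?_eq_some hkb
  have : ka = kb := by omega
  subst this
  rw [← hga, ← hgb]

theorem pv_mem_F {b : String → String → Bool} {xs acc : List String} {y : String} :
    y ∈ pvF b xs acc ↔ y ∈ acc ∨ y ∈ xs := by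
  induction xs generalizing acc with
  | nil => simp [pvF]
  | cons x xs ih =>
    simp [pvF, List.foldl_cons] at *
    rw [ih]
    simp [PySem.List.mem_insertBy]
    tauto

theorem pv_insertBy_low {b : String → String → Bool} {x : String} {L H : List String}
    (h : ∀ y ∈ H, b x y = true) :
    PySem.List.insertBy b x (L ++ H) = PySem.List.insertBy b x L ++ H := by
  induction L with
  | nil =>
    cases H with
    | nil => simp
    | cons h0 t => simp [PySem.List.insertBy, h h0 (by simp)]
  | cons a L ih =>
    simp only [List.cons_append, PySem.List.insertBy]
    by_cases hb : b x a = true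
    · simp [hb]
    · simp only [Bool.not_eq_true] at hb
      simp [hb, ih]

theorem pv_insertBy_high {b : String → String → Bool} {x : String} {L H : List String}
    (h : ∀ y ∈ L, b x y = false) :
    PySem.List.insertBy b x (L ++ H) = L ++ PySem.List.insertBy b x H := by
  induction L with
  | nil => simp
  | cons a L ih =>
    simp only [List.cons_append, PySem.List.insertBy, h a (by simp)]
    simp [ih (fun y hy => h y (by simp [hy]))]

theorem pv_insertBy_congr {b b' : String → String → Bool} {x : String} {ys : List String}
    (h : ∀ y ∈ ys, b x y = b' x y) :
    PySem.List.insertBy b x ys = PySem.List.insertBy b' x ys := by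
  induction ys with
  | nil => simp [PySem.List.insertBy]
  | cons a t ih =>
    simp only [PySem.List.insertBy, h a (by simp)]
    rw [ih (fun y hy => h y (by simp [hy]))]

theorem pv_F_congr {b b' : String → String → Bool} {S : String → Prop}
    (hbb : ∀ a c, S a → S c → b a c = b' a c) :
    ∀ xs acc, (∀ a ∈ acc, S a) → (∀ a ∈ xs, S a) → pvF b xs acc = pvF b' xs acc := by
  intro xs
  induction xs with
  | nil => intro acc _ _; rfl
  | cons x t ih =>
    intro acc hacc hxs
    simp only [pvF, List.foldl_cons]
    have hx : S x := hxs x (by simp)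
    rw [pv_insertBy_congr (fun y hy => hbb x y hx (hacc y hy))]
    exact ih _ (fun a ha => by
        rcases (PySem.List.mem_insertBy _ _ _ _).1 ha with rfl | ha
        · exact hx
        · exact hacc a ha)
      (fun a ha => hxs a (by simp [ha]))

-- the stable sort splits at the rank/16 threshold
theorem pv_split (xs : List String) :
    pvF pvB2 xs [] = pvF pvB2 (xs.filter pvLow) [] ++ pvF pvB2 (xs.filter (fun x => !pvLow x)) [] := by
  induction xs using List.reverseRecOn with
  | nil => rfl
  | append_singleton xs x ih =>
    have hfold : ∀ (ys : List String) (acc : List String),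
        pvF pvB2 (ys ++ [x]) acc = PySem.List.insertBy pvB2 x (pvF pvB2 ys acc) := by
      intro ys acc; simp [pvF, List.foldl_append]
    by_cases hx : pvLow x = true
    · have hH : ∀ y ∈ pvF pvB2 (xs.filter (fun x => !pvLow x)) [], pvB2 x y = true := by
        intro y hy
        rcases pv_mem_F.1 hy with hy | hy
        · simp at hy
        · have hyl : pvLow y = false := by
            have := List.of_mem_filter hy; simpa using this
          have h1 := pvK1_low hx
          have h2 := pvK1_high hyl
          simp [pvB2, h1.1, h2]
          omega
      rw [hfold, ih, pv_insertBy_low hH]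
      simp [List.filter_append, hx, hfold]
    · have hx' : pvLow x = false := by simpa using hx
      have hL : ∀ y ∈ pvF pvB2 (xs.filter pvLow) [], pvB2 x y = false := by
        intro y hy
        rcases pv_mem_F.1 hy with hy | hy
        · simp at hy
        · have hyl : pvLow y = true := List.of_mem_filter hy
          have h1 := pvK1_high hx'
          have h2 := pvK1_low hyl
          simp [pvB2, h1, h2.1]
          omega
      rw [hfold, ih, pv_insertBy_high hL]
      simp [List.filter_append, hx', hfold]

theorem pv_low_agree : ∀ a c, pvLow a = true → pvLow c = true → pvB2 a c = pvBA a c := by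
  intro a c ha hc
  obtain ⟨ha1, _⟩ := pvK1_low ha
  obtain ⟨hc1, _⟩ := pvK1_low hc
  rcases Nat.lt_trichotomy (pvKeyA a) (pvKeyA c) with h | h | h
  · simp [pvB2, pvBA, ha1, hc1, h]
  · have : a = c := pvKeyA_inj ha hc h
    subst this
    simp [pvB2, pvBA]
  · simp [pvB2, pvBA, ha1, hc1]
    intro h1 h2
    omega

theorem pv_high_agree : ∀ a c, pvLow a = false → pvLow c = false → pvB2 a c = pvBS a c := by
  intro a c ha hc
  simp [pvB2, pvBS, pvK1_high ha, pvK1_high hc]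

theorem pv_partition (xs : List String) :
    ∀ l0 h0, xs.foldl
      (fun (acc : List String × List String) pde =>
        if get_pde_order.contains pde then (acc.1 ++ [pde], acc.2) else (acc.1, acc.2 ++ [pde]))
      (l0, h0)
      = (l0 ++ xs.filter pvLow, h0 ++ xs.filter (fun x => !pvLow x)) := by
  induction xs with
  | nil => simp
  | cons x t ih =>
    intro l0 h0
    rw [List.foldl_cons]
    by_cases hx : pvLow x = true
    · have hxC : get_pde_order.contains x = true := by simpa [pvLow] using hx
      rw [if_pos hxC, ih]
      simp [hx]
    · have hx' : pvLow x = false := by simpa using hx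
      have hxC : get_pde_order.contains x = false := by simpa [pvLow] using hx'
      rw [if_neg (by simpa using hxC), ih]
      simp [hx']

theorem pv_main (xs : List String) : sort_pdes xs = sort_pdes_alt xs := by
  have halt : sort_pdes_alt xs = pvF pvB2 xs [] := rfl
  have hA : sort_pdes xs
      = pvF pvBA (xs.filter pvLow) [] ++ pvF pvBS (xs.filter (fun x => !pvLow x)) [] := by
    simp only [sort_pdes, pv_partition xs [] [], List.nil_append,
      PySem.List.sorted_eq_foldl_insertBy]
    rfl
  rw [halt, pv_split, hA]
  congr 1
  · exact (pv_F_congr (S := fun x => pvLow x = true) pv_low_agree _ []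
      (by simp) (fun a ha => List.of_mem_filter ha)).symm
  · exact (pv_F_congr (S := fun x => pvLow x = false) pv_high_agree _ []
      (by simp) (fun a ha => by simpa using List.of_mem_filter ha)).symm

-- ===== VERDICT (by name: the statement is the Claim_ definition above) =====
theorem sort_pdes_spec : Claim_equal_sort_pdes := by
  intro xs _
  exact pv_main xs
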